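-- pv_equiv track=rewrite | github.com/elhamrazi/ai-first-project | p3.py | get_inv
-- ===== SOURCE A (Python) =====
-- def get_inv(arr):
--     inv_count = 0
--     n = len(arr)
--     for i in range(n):
--         for j in range(i + 1, n):
--             if arr[i] < arr[j]:
--                 inv_count += 1
--
--     return inv_count
-- ===== SOURCE B (Python) =====
-- def get_inv(arr):
--     # merge-sort pair counting: O(n log n) instead of the quadratic double loop
--     def sort_count(a):
--         if len(a) <= 1:
--             return a, 0
--         mid = len(a) // 2
--         left, cl = sort_count(a[:mid])
--         right, cr = sort_count(a[mid:])
--         merged = []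
--         cnt = cl + cr
--         i = j = 0
--         while i < len(left) and j < len(right):
--             if left[i] < right[j]:
--                 cnt += len(right) - j
--                 merged.append(left[i])
--                 i += 1
--             else:
--                 merged.append(right[j])
--                 j += 1
--         merged.extend(left[i:])
--         merged.extend(right[j:])
--         return merged, cnt
--     return sort_count(arr)[1]
-- ===== Notes on version B (the rewrite author's own statement) =====
-- stated objective: faster
-- what changed: Replaced the quadratic double index loop with merge-sort counting: cross pairs left[i]<right[j] are counted during the merge of sorted halves.
import Mathlib
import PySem

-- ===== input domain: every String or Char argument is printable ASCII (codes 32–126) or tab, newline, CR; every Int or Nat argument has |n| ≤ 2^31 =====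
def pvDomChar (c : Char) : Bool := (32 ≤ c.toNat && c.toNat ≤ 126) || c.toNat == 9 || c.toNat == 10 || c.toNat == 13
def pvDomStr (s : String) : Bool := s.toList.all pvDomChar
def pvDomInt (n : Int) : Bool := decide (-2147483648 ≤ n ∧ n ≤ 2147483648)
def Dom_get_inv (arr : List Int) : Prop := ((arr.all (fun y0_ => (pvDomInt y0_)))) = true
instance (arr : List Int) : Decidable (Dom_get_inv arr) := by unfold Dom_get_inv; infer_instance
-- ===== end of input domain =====

-- B replaces A's quadratic double index loop by merge-sort pair counting (asymptotically faster); both return the number of pairs i<j with arr[i]<arr[j].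


-- ===== PORT A =====
-- literal port of the nested index loops
def get_inv (arr : List Int) : Int :=
  (PySem.List.pyRange 0 (PySem.List.len arr) 1).foldl (fun inv i =>
    (PySem.List.pyRange (i + 1) (PySem.List.len arr) 1).foldl (fun inv j =>
      if PySem.List.pyGetD arr i 0 < PySem.List.pyGetD arr j 0 then inv + 1 else inv) inv) 0

-- ===== PORT B =====
-- the merge-with-count while loop of Source B (plus the two extends at the end)
def pvMergeCount : List Int → List Int → List Int × Int
  | [], r => (r, 0)
  | x :: l, [] => (x :: l, 0)
  | x :: l, y :: r =>
    if x < y then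
      let p := pvMergeCount l (y :: r)
      (x :: p.1, p.2 + ((y :: r).length : Int))
    else
      let p := pvMergeCount (x :: l) r
      (y :: p.1, p.2)
termination_by l r => l.length + r.length

-- Source B's recursive sort_count: split at len//2, recurse, merge counting cross pairs
def pvSortCount (a : List Int) : List Int × Int :=
  if _h : a.length ≤ 1 then (a, 0)
  else
    ((pvMergeCount (pvSortCount (a.take (a.length / 2))).1 (pvSortCount (a.drop (a.length / 2))).1).1,
     (pvSortCount (a.take (a.length / 2))).2 + (pvSortCount (a.drop (a.length / 2))).2 +
       (pvMergeCount (pvSortCount (a.take (a.length / 2))).1 (pvSortCount (a.drop (a.length / 2))).1).2)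
termination_by a.length
decreasing_by
  all_goals simp [List.length_take, List.length_drop]; omega

def get_inv_alt (arr : List Int) : Int := (pvSortCount arr).2

-- ===== PRECONDITION & SPEC =====
def Spec_get_inv (arr : List Int) (out : Int) : Prop := out = get_inv_alt arr
instance (arr : List Int) (out : Int) : Decidable (Spec_get_inv arr out) := by unfold Spec_get_inv; infer_instance

-- ===== CLAIM (what is proved, stated in full; the proofs are below) =====
def Claim_equal_get_inv : Prop := ∀ (arr : List Int), Dom_get_inv arr → Spec_get_inv arr (get_inv arr)

-- ===== LEMMAS AND PROOFS =====

-- number of pairs i<j with arr[i]<arr[j], as a structural recursion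
def pvAsc : List Int → Int
  | [] => 0
  | x :: xs => (xs.countP (fun y => decide (x < y)) : Int) + pvAsc xs

-- cross pairs: x from l, y from r, x < y
def pvCross (l r : List Int) : Int :=
  (l.map (fun x => ((r.countP (fun y => decide (x < y)) : Nat) : Int))).sum

theorem pvAsc_append (l r : List Int) :
    pvAsc (l ++ r) = pvAsc l + pvAsc r + pvCross l r := by
  induction l with
  | nil => simp [pvAsc, pvCross]
  | cons x l ih =>
    simp only [List.cons_append, pvAsc, ih, pvCross, List.map_cons, List.sum_cons,
      List.countP_append]
    push_cast
    ring

theorem pvCross_perm_left {l l' : List Int} (h : l.Perm l') (r : List Int) :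
    pvCross l r = pvCross l' r := by
  unfold pvCross
  exact List.Perm.sum_eq (h.map _)

theorem pvCross_perm_right (l : List Int) {r r' : List Int} (h : r.Perm r') :
    pvCross l r = pvCross l r' := by
  unfold pvCross
  congr 1
  apply List.map_congr_left
  intro x _
  rw [h.countP_eq]

theorem pvMergeCount_spec : ∀ (l r : List Int),
    l.Pairwise (· ≤ ·) → r.Pairwise (· ≤ ·) →
    (pvMergeCount l r).1.Perm (l ++ r) ∧ (pvMergeCount l r).1.Pairwise (· ≤ ·) ∧
      (pvMergeCount l r).2 = pvCross l r
  | [], r, _, hr => by simp [pvMergeCount, pvCross, hr]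
  | x :: l, [], hl, _ => by simp [pvMergeCount, pvCross, hl]
  | x :: l, y :: r, hl, hr => by
    rw [pvMergeCount]
    by_cases hxy : x < y
    · obtain ⟨hp, hs, hc⟩ := pvMergeCount_spec l (y :: r) hl.of_cons hr
      simp only [if_pos hxy]
      refine ⟨(hp.cons x), ?_, ?_⟩
      · refine List.pairwise_cons.mpr ⟨?_, hs⟩
        intro b hb
        have hb' : b ∈ l ++ (y :: r) := hp.mem_iff.mp hb
        rcases List.mem_append.mp hb' with h1 | h2
        · exact List.rel_of_pairwise_cons hl h1
        · rcases List.mem_cons.mp h2 with rfl | h3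
          · exact le_of_lt hxy
          · exact le_of_lt (lt_of_lt_of_le hxy (List.rel_of_pairwise_cons hr h3))
      · simp only [hc]
        have hcount : (y :: r).countP (fun z => decide (x < z)) = (y :: r).length := by
          rw [List.countP_eq_length]
          intro z hz
          rcases List.mem_cons.mp hz with rfl | h3
          · simp [hxy]
          · simp [lt_of_lt_of_le hxy (List.rel_of_pairwise_cons hr h3)]
        simp only [pvCross, List.map_cons, List.sum_cons, hcount]
        ring
    · obtain ⟨hp, hs, hc⟩ := pvMergeCount_spec (x :: l) r hl hr.of_cons
      simp only [if_neg hxy]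
      have hyx : y ≤ x := le_of_not_gt hxy
      refine ⟨(hp.cons y).trans List.perm_middle.symm, ?_, ?_⟩
      · refine List.pairwise_cons.mpr ⟨?_, hs⟩
        intro b hb
        have hb' : b ∈ (x :: l) ++ r := hp.mem_iff.mp hb
        rcases List.mem_append.mp hb' with h1 | h2
        · rcases List.mem_cons.mp h1 with rfl | h3
          · exact hyx
          · exact le_trans hyx (List.rel_of_pairwise_cons hl h3)
        · exact List.rel_of_pairwise_cons hr h2
      · simp only [hc]
        unfold pvCross
        congr 1
        apply List.map_congr_left
        intro z hz
        have hz0 : (decide (z < y)) = false := by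
          rcases List.mem_cons.mp hz with rfl | h3
          · simp [not_lt.mpr hyx]
          · simp [not_lt.mpr (le_trans hyx (List.rel_of_pairwise_cons hl h3))]
        simp [hz0]
termination_by l r => l.length + r.length

theorem pvSortCount_spec : ∀ (a : List Int),
    (pvSortCount a).1.Perm a ∧ (pvSortCount a).1.Pairwise (· ≤ ·) ∧ (pvSortCount a).2 = pvAsc a := by
  intro a
  induction a using pvSortCount.induct with
  | case1 a h =>
    rw [pvSortCount, dif_pos h]
    match a, h with
    | [], _ => exact ⟨List.Perm.refl _, by simp, by simp [pvAsc]⟩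
    | [x], _ => exact ⟨List.Perm.refl _, by simp, by simp [pvAsc]⟩
  | case2 a h ihl ihr =>
    rw [pvSortCount, dif_neg h]
    obtain ⟨hlp, hls, hlc⟩ := ihl
    obtain ⟨hrp, hrs, hrc⟩ := ihr
    obtain ⟨hmp, hms, hmc⟩ := pvMergeCount_spec _ _ hls hrs
    refine ⟨?_, hms, ?_⟩
    · exact hmp.trans ((hlp.append hrp).trans (by rw [List.take_append_drop]))
    · simp only [hmc, hlc, hrc]
      rw [pvCross_perm_left hlp, pvCross_perm_right _ hrp]
      have := pvAsc_append (a.take (a.length / 2)) (a.drop (a.length / 2))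
      rw [List.take_append_drop] at this
      omega

-- A-side: the nested index loops equal a sum over List.range
theorem get_inv_eq_sum (arr : List Int) :
    get_inv arr = ((List.range arr.length).map (fun i =>
      (((arr.drop (i + 1)).countP (fun y => decide (arr.getD i 0 < y)) : Nat) : Int))).sum := by
  unfold get_inv
  rw [PySem.List.foldl_congr_mem _ _ (fun inv i =>
      inv + (((arr.drop (i + 1).toNat).countP
        (fun y => decide (PySem.List.pyGetD arr i 0 < y)) : Nat) : Int)) 0 ?_]
  · rw [PySem.List.foldl_add, PySem.List.pyRange_one 0 (PySem.List.len arr)]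
    simp only [PySem.List.len_eq, sub_zero, Int.toNat_natCast, List.map_map, zero_add]
    apply congrArg
    apply List.map_congr_left
    intro k _
    simp only [Function.comp_apply, PySem.List.pyGetD_natCast]
    norm_num
  · intro acc i hi
    have h0 : (0:Int) ≤ i := by
      have := (PySem.List.mem_pyRange_one.mp hi).1
      omega
    rw [PySem.List.foldl_pyRange_pyGetD arr 0 (fun a v =>
      if PySem.List.pyGetD arr i 0 < v then a + 1 else a) acc (by omega : (0:Int) ≤ i + 1)]
    have := PySem.List.foldl_count_if (fun v => decide (PySem.List.pyGetD arr i 0 < v))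
      (arr.drop (i + 1).toNat) acc
    simpa using this

theorem sum_eq_pvAsc (arr : List Int) :
    ((List.range arr.length).map (fun i =>
      (((arr.drop (i + 1)).countP (fun y => decide (arr.getD i 0 < y)) : Nat) : Int))).sum
      = pvAsc arr := by
  induction arr with
  | nil => simp [pvAsc]
  | cons x xs ih =>
    rw [List.length_cons, List.range_succ_eq_map, List.map_cons, List.sum_cons, List.map_map]
    simp only [pvAsc]
    rw [← ih]
    have hmap : ((List.range xs.length).map ((fun i =>
        ((((x :: xs).drop (i + 1)).countP (fun y => decide ((x :: xs).getD i 0 < y)) : Nat) : Int))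
          ∘ (fun i => i + 1)))
        = (List.range xs.length).map (fun i =>
        (((xs.drop (i + 1)).countP (fun y => decide (xs.getD i 0 < y)) : Nat) : Int)) := by
      apply List.map_congr_left
      intro i _
      simp only [Function.comp_apply, List.getD_cons_succ, List.drop_succ_cons]
    rw [hmap]
    simp

theorem get_inv_eq_pvAsc (arr : List Int) : get_inv arr = pvAsc arr := by
  rw [get_inv_eq_sum, sum_eq_pvAsc]

-- ===== VERDICT (by name: the statement is the Claim_ definition above) =====
theorem get_inv_spec : Claim_equal_get_inv := by
  intro arr _
  unfold Spec_get_inv get_inv_alt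
  rw [get_inv_eq_pvAsc, (pvSortCount_spec arr).2.2]
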